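-- pv_equiv track=rewrite | github.com/muhammedozkan/CSE321-Introduction-to-Algorithms | HW4/part4.py | find_incorrectly_bottle
-- ===== SOURCE A (Python) =====
-- def different(A, B,samplescale):
--     if type(A) == list:
--         if sum(A) == (len(A)*samplescale):
--             return B
--         else:
--             return A
--     else:
--         if A == samplescale:
--             return B
--         else:
--             return A
--
-- def find_incorrectly_bottle(lst,samplescale):
--     if len(lst) == 1:
--         return lst[0]
--     if len(lst) == 2:
--         return different(lst[0], lst[1],samplescale)
--
--     A = lst[0: len(lst) // 2]
--     B = lst[len(lst) // 2:len(lst)]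
--
--     return find_incorrectly_bottle(different(A, B,samplescale),samplescale)
-- ===== SOURCE B (Python) =====
-- def find_incorrectly_bottle(lst, samplescale):
--     while len(lst) != 1:
--         if len(lst) == 2:
--             return lst[1] if lst[0] == samplescale else lst[0]
--         mid = len(lst) // 2
--         A = lst[:mid]
--         lst = lst[mid:] if sum(A) == mid * samplescale else A
--     return lst[0]
-- ===== Notes on version B (the rewrite author's own statement) =====
-- stated objective: simpler
-- what changed: Replaces the mutual recursion through the type-dispatching helper 'different' with a single iterative while-loop over one current-sublist variable, inlining both comparisons; no helper, no recursion.
import Mathlib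
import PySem

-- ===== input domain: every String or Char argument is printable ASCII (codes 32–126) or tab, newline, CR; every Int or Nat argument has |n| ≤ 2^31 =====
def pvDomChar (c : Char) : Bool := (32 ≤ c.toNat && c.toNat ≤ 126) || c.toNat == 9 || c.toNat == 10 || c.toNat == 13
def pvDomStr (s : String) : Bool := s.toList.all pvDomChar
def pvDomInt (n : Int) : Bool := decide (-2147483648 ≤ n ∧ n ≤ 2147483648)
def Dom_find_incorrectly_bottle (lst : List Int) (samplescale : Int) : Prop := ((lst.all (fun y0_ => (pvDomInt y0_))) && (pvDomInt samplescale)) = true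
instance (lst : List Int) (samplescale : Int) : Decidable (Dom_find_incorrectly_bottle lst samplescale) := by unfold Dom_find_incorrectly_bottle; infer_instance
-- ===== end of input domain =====

-- B flattens A's mutual recursion through the type-dispatching helper `different`
-- into a single iterative loop over one current-sublist variable (objective: simpler).


-- ===== PORT A =====
-- Python's `different` dispatches on `type(A) == list`; the call sites make the type
-- statically known, so it is ported as two helpers, one per branch of the type test.
def differentList (A B : List Int) (samplescale : Int) : List Int :=
  if A.sum == (A.length : Int) * samplescale then B else A

def differentInt (A B : Int) (samplescale : Int) : Int :=
  if A == samplescale then B else A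

-- Recursive halving.  `lst[0]` under `len(lst) == 1` is `headD 0` (exact: list nonempty);
-- `lst[0: len//2]` / `lst[len//2: len]` with nonnegative in-range bounds are take/drop (exact).
-- On `lst = []` Python A recurses forever (RecursionError); that input is outside
-- Pre_find_incorrectly_bottle and the port returns 0 there purely to be total.
def find_incorrectly_bottle (lst : List Int) (samplescale : Int) : Int :=
  if lst.length = 1 then lst.headD 0
  else if lst.length = 2 then differentInt (lst.headD 0) (lst.getD 1 0) samplescale
  else if lst.length = 0 then 0
  else
    find_incorrectly_bottle
      (differentList (lst.take (lst.length / 2)) (lst.drop (lst.length / 2)) samplescale)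
      samplescale
termination_by lst.length
decreasing_by
  simp only [differentList]
  split <;> simp <;> omega

-- ===== PORT B =====
-- Source B's `while len(lst) != 1:` loop, as tail recursion on the single loop variable.
-- On `lst = []` the Python loop never exits; outside Pre_, the port returns 0 to be total.
def find_incorrectly_bottle_alt (lst : List Int) (samplescale : Int) : Int :=
  if lst.length ≠ 1 then
    if lst.length = 2 then
      if lst.headD 0 == samplescale then lst.getD 1 0 else lst.headD 0
    else if lst.length = 0 then 0
    else
      let mid := lst.length / 2
      let A := lst.take mid
      find_incorrectly_bottle_alt
        (if A.sum == (mid : Int) * samplescale then lst.drop mid else A) samplescale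
  else lst.headD 0
termination_by lst.length
decreasing_by
  split <;> simp <;> omega

-- ===== PRECONDITION & SPEC =====
-- Pre_ excludes only the empty list, on which Python A never returns (infinite recursion,
-- RecursionError) and Python B loops forever.
def Pre_find_incorrectly_bottle (lst : List Int) (samplescale : Int) : Prop := lst ≠ []
instance (lst : List Int) (samplescale : Int) : Decidable (Pre_find_incorrectly_bottle lst samplescale) := by unfold Pre_find_incorrectly_bottle; infer_instance
def pvWitness_find_incorrectly_bottle : List Int × Int := ([5, 3, 3, 3], 3)

def Spec_find_incorrectly_bottle (lst : List Int) (samplescale : Int) (out : Int) : Prop := out = find_incorrectly_bottle_alt lst samplescale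
instance (lst : List Int) (samplescale : Int) (out : Int) : Decidable (Spec_find_incorrectly_bottle lst samplescale out) := by unfold Spec_find_incorrectly_bottle; infer_instance

-- ===== CLAIM (what is proved, stated in full; the proofs are below) =====
def Claim_equal_find_incorrectly_bottle : Prop := ∀ (lst : List Int) (samplescale : Int), Dom_find_incorrectly_bottle lst samplescale → Pre_find_incorrectly_bottle lst samplescale → Spec_find_incorrectly_bottle lst samplescale (find_incorrectly_bottle lst samplescale)

-- ===== LEMMAS AND PROOFS =====
theorem find_eq_alt (n : Nat) : ∀ (lst : List Int) (s : Int), lst.length = n →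
    find_incorrectly_bottle lst s = find_incorrectly_bottle_alt lst s := by
  induction n using Nat.strong_induction_on with
  | _ n ih =>
    intro lst s hn
    rw [find_incorrectly_bottle, find_incorrectly_bottle_alt]
    by_cases h1 : lst.length = 1
    · simp [h1]
    · by_cases h2 : lst.length = 2
      · simp [h2, differentInt]
      · by_cases h0 : lst.length = 0
        · simp [h0]
        · have hmid : (lst.take (lst.length / 2)).length = lst.length / 2 := by
            simp; omega
          simp only [h1, h2, h0, if_false, ne_eq, not_false_eq_true,
            if_true, differentList, hmid]
          apply ih _ _ _ _ rfl
          subst hn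
          split <;> simp <;> omega

-- ===== VERDICT (by name: the statement is the Claim_ definition above) =====
theorem find_incorrectly_bottle_spec : Claim_equal_find_incorrectly_bottle := by
  intro lst s _ _
  exact find_eq_alt lst.length lst s rfl
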